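-- pv_equiv track=rewrite | github.com/BU-Spark/CS506-Fall2020-Projects | juvenile_justice/analysis/utils/springfield_create_csv.py | create_list_of_lists
-- ===== SOURCE A (Python) =====
-- def create_list_of_lists(no_headers, record_start_indices):
--     records_separated = []
--     for i in range(len(record_start_indices)):
--         record_list = []
--         # If we're at the final record, we need to avoid an IndexError from trying to access index i+1
--         if i == len(record_start_indices)-1:
--             for j in range(record_start_indices[i],len(no_headers)-1):
--                 record_list.append(no_headers[j])
--         else:
--             for j in range(record_start_indices[i], record_start_indices[i+1]):
--                 record_list.append(no_headers[j])
--         records_separated.append(record_list)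
--     return records_separated
-- ===== SOURCE B (Python) =====
-- def create_list_of_lists(no_headers, record_start_indices):
--     ends = record_start_indices[1:] + [len(no_headers) - 1]
--     return [no_headers[s:e] for s, e in zip(record_start_indices, ends)]
-- ===== Notes on version B (the rewrite author's own statement) =====
-- stated objective: simpler
-- what changed: Replaces the index-counting outer loop with its last-record special case and element-by-element append loops by a boundary table (each start's end is the next start, the last being len-1) and one uniform slice per (start, end) pair.
-- outside the precondition, e.g. on create_list_of_lists(['a', 'b', 'c'], [-2]): A returns [['b', 'c', 'a', 'b']], B returns [['b']]
import Mathlib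
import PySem

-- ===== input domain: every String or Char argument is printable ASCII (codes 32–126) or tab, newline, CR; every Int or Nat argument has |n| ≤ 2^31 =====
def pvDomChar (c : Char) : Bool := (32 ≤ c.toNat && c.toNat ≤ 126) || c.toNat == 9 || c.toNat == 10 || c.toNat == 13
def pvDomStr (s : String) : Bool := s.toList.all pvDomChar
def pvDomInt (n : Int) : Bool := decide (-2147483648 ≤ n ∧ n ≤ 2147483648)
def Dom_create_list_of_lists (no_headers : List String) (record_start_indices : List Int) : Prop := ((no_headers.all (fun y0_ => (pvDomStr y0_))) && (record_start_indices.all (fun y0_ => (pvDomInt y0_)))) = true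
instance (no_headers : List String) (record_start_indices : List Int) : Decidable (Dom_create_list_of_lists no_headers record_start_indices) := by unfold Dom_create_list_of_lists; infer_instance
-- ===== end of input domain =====

-- B replaces A's index-counting loops with a last-record special case by a boundary table
-- (each record's end is the next start, len-1 for the last) and one slice per record: a
-- simpler decomposition with the same cost.


-- ===== PORT A =====
def create_list_of_lists (no_headers : List String) (record_start_indices : List Int) : List (List String) :=
  (PySem.List.pyRange 0 (record_start_indices.length : Int) 1).foldl (fun records_separated i =>
    let record_list : List String :=
      if i = (record_start_indices.length : Int) - 1 then
        (PySem.List.pyRange (PySem.List.pyGetD record_start_indices i 0) ((no_headers.length : Int) - 1) 1).foldl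
          (fun record_list j => record_list ++ [PySem.List.pyGetD no_headers j ""]) []
      else
        (PySem.List.pyRange (PySem.List.pyGetD record_start_indices i 0) (PySem.List.pyGetD record_start_indices (i + 1) 0) 1).foldl
          (fun record_list j => record_list ++ [PySem.List.pyGetD no_headers j ""]) []
    records_separated ++ [record_list]) []

-- ===== PORT B =====
def create_list_of_lists_alt (no_headers : List String) (record_start_indices : List Int) : List (List String) :=
  let ends : List Int := PySem.List.slice record_start_indices (some 1) none ++ [(no_headers.length : Int) - 1]
  (record_start_indices.zip ends).map (fun se => PySem.List.slice no_headers (some se.1) (some se.2))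

-- ===== PRECONDITION & SPEC =====
-- Pre_ restricts to the function's natural domain: every start is non-negative and every
-- non-empty adjacent range stops within the list (next start ≤ len(no_headers) unless it is
-- ≤ its own start). Outside it A either raises IndexError or returns an accidental
-- negative-index-wraparound value that is an artefact of A's implementation.
def Pre_create_list_of_lists (no_headers : List String) (record_start_indices : List Int) : Prop :=
  (∀ r ∈ record_start_indices, 0 ≤ r) ∧
  ∀ p ∈ record_start_indices.zip record_start_indices.tail,
    p.2 ≤ (no_headers.length : Int) ∨ p.2 ≤ p.1
instance (no_headers : List String) (record_start_indices : List Int) : Decidable (Pre_create_list_of_lists no_headers record_start_indices) := by unfold Pre_create_list_of_lists; infer_instance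

def pvWitness_create_list_of_lists : List String × List Int := (["a", "b", "c"], [0, 2])

def Spec_create_list_of_lists (no_headers : List String) (record_start_indices : List Int) (out : List (List String)) : Prop := out = create_list_of_lists_alt no_headers record_start_indices
instance (no_headers : List String) (record_start_indices : List Int) (out : List (List String)) : Decidable (Spec_create_list_of_lists no_headers record_start_indices out) := by unfold Spec_create_list_of_lists; infer_instance

-- ===== CLAIM (what is proved, stated in full; the proofs are below) =====
def Claim_equal_create_list_of_lists : Prop := ∀ (no_headers : List String) (record_start_indices : List Int), Dom_create_list_of_lists no_headers record_start_indices → Pre_create_list_of_lists no_headers record_start_indices → Spec_create_list_of_lists no_headers record_start_indices (create_list_of_lists no_headers record_start_indices)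

-- ===== LEMMAS AND PROOFS =====

-- A's inner append loop over range(s, e) equals the slice no_headers[s:e] for bounds
-- with 0 ≤ s, 0 ≤ e ≤ len(no_headers).
lemma inner_eq_slice (nh : List String) (s e : Int) (hs : 0 ≤ s) (he0 : 0 ≤ e)
    (he : e ≤ (nh.length : Int)) :
    (PySem.List.pyRange s e 1).foldl (fun rl j => rl ++ [PySem.List.pyGetD nh j ""]) []
      = PySem.List.slice nh (some s) (some e) := by
  rw [PySem.List.foldl_append_singleton_eq_map, PySem.List.slice_toNat nh hs he0]
  apply List.ext_getElem
  · simp [PySem.List.length_pyRange_one]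
    omega
  · intro k h1 h2
    have hklt : (s + (k : Int)) < e := by
      have := PySem.List.length_pyRange_one s e
      simp only [List.nil_append, List.length_map, this] at h1
      omega
    simp only [List.nil_append, List.getElem_map, PySem.List.getElem_pyRange_one, List.getElem_take,
      List.getElem_drop]
    rw [PySem.List.pyGetD_eq_getElem nh "" (by omega) (by omega)]
    congr 1
    omega

-- ===== VERDICT (by name: the statement is the Claim_ definition above) =====
theorem create_list_of_lists_spec : Claim_equal_create_list_of_lists := by
  intro no_headers record_start_indices _hdom hpre
  obtain ⟨hpos, hadj⟩ := hpre
  unfold Spec_create_list_of_lists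
  unfold create_list_of_lists create_list_of_lists_alt
  rw [PySem.List.foldl_append_singleton_eq_map, PySem.List.slice_from_one]
  apply List.ext_getElem
  · simp [PySem.List.length_pyRange_one, List.length_zip]
    omega
  · intro k h1 h2
    have hk : k < record_start_indices.length := by
      simpa [PySem.List.length_pyRange_one] using h1
    simp only [List.nil_append, List.getElem_map, PySem.List.getElem_pyRange_one, List.getElem_zip,
      zero_add]
    rw [PySem.List.pyGetD_eq_getElem record_start_indices 0 (by omega) (by exact_mod_cast hk)]
    simp only [Int.toNat_natCast]
    have hsb := hpos _ (List.getElem_mem (by exact_mod_cast hk))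
    by_cases hlast : k = record_start_indices.length - 1
    · rw [if_pos (by omega)]
      have hends : (record_start_indices.tail ++ [(no_headers.length : Int) - 1])[k]'(by
          simp [List.length_tail]; omega) = (no_headers.length : Int) - 1 := by
        rw [List.getElem_append_right (by simp [List.length_tail]; omega)]
        simp [List.length_tail]
      rw [hends]
      rcases List.eq_nil_or_concat' no_headers with h | h
      · subst h
        simp only [List.length_nil, Nat.cast_zero, zero_sub]
        rw [PySem.List.pyRange_one_eq_nil (by omega)]
        simp [PySem.List.slice]
      · exact inner_eq_slice _ _ _ hsb (by rcases h with ⟨ys, y, rfl⟩; simp) (by omega)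
    · rw [if_neg (by omega)]
      have hk1 : k + 1 < record_start_indices.length := by omega
      have hends : (record_start_indices.tail ++ [(no_headers.length : Int) - 1])[k]'(by
          simp [List.length_tail]; omega) = record_start_indices[k + 1] := by
        rw [List.getElem_append_left (by simp [List.length_tail]; omega)]
        simp [List.getElem_tail]
      rw [hends]
      rw [show ((k : Int) + 1) = (((k + 1 : Nat)) : Int) from by push_cast; ring]
      rw [PySem.List.pyGetD_eq_getElem record_start_indices 0 (by omega) (by exact_mod_cast hk1)]
      simp only [Int.toNat_natCast]
      have he0 := hpos _ (List.getElem_mem (by exact_mod_cast hk1))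
      have hzk : k < (record_start_indices.zip record_start_indices.tail).length := by
        simp [List.length_zip, List.length_tail]; omega
      have hpair := hadj _ (List.getElem_mem hzk)
      rw [List.getElem_zip] at hpair
      simp only [List.getElem_tail] at hpair
      rcases hpair with he | hes
      · exact inner_eq_slice _ _ _ hsb he0 he
      · rw [PySem.List.pyRange_one_eq_nil hes, PySem.List.slice_toNat no_headers hsb he0]
        have h0 : (record_start_indices[k + 1]).toNat - (record_start_indices[k]).toNat = 0 := by
          omega
        simp [h0]
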